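-- pv_equiv track=rewrite | github.com/chenshoval/intra-trading-system-dynamic | notebooks/05_chart_reading/chart_calculations.py | find_swing_lows
-- ===== SOURCE A (Python) =====
-- def find_swing_lows(lows, n=3):
--     """
--     A swing low is a point where the LOW is lower than
--     the N bars before it AND the N bars after it.
--
--     Think of it as a local valley / bottom.
--     """
--     swings = []
--     for i in range(n, len(lows) - n):
--         is_lowest = True
--         for j in range(1, n + 1):
--             if lows[i] >= lows[i - j] or lows[i] >= lows[i + j]:
--                 is_lowest = False
--                 break
--         if is_lowest:
--             swings.append((i, lows[i]))
--     return swings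
-- ===== SOURCE B (Python) =====
-- def find_swing_lows(lows, n=3):
--     if n == 0:
--         return list(enumerate(lows))
--     L = len(lows)
--     # prefix minima within blocks of size n
--     pre = []
--     for i, x in enumerate(lows):
--         pre.append(x if i % n == 0 or not pre else min(pre[-1], x))
--     # suffix minima within blocks of size n (built backwards, then reversed)
--     suf = []
--     for i in range(L - 1, -1, -1):
--         suf.append(lows[i] if i % n == n - 1 or i == L - 1 else min(suf[-1], lows[i]))
--     suf.reverse()
--     # min(lows[a:a+n]) == min(suf[a], pre[a+n-1]): O(1) per window
--     res = []
--     for i in range(n, L - n):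
--         x = lows[i]
--         if x < min(suf[i - n], pre[i - 1]) and x < min(suf[i + 1], pre[i + n]):
--             res.append((i, x))
--     return res
-- ===== Notes on version B (the rewrite author's own statement) =====
-- stated objective: alternative
-- what changed: Replaces the per-index scan of n neighbours on each side by a sliding-window minimum: one forward pass of block-prefix minima and one backward pass of block-suffix minima (blocks of size n), after which each index is tested against two precomputed window minima; this removes the inner neighbour loop (O(len) passes independent of n) but was not measured faster at the probe's small n.
import Mathlib
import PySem

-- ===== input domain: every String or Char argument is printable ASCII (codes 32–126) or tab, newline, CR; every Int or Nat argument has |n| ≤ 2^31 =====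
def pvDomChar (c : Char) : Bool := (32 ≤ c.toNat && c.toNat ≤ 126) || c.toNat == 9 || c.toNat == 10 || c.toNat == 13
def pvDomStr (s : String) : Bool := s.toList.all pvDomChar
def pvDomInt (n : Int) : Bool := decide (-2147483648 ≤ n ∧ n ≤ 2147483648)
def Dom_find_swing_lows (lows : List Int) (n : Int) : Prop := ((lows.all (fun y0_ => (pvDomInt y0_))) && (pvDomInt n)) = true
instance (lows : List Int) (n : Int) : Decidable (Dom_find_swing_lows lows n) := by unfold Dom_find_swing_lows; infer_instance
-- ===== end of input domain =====

-- B replaces A's per-index neighbour scan by a sliding-window minimum built from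
-- block-prefix/block-suffix minima (objective: alternative algorithm).

-- ===== PORT A =====
def find_swing_lows (lows : List Int) (n : Int) : List (Int × Int) :=
  (PySem.List.pyRange n ((lows.length : Int) - n) 1).foldl
    (fun swings i =>
      let is_lowest := (PySem.List.pyRange 1 (n + 1) 1).foldl
        (fun il j =>
          if il then
            if PySem.List.pyGetD lows i 0 ≥ PySem.List.pyGetD lows (i - j) 0 ∨
               PySem.List.pyGetD lows i 0 ≥ PySem.List.pyGetD lows (i + j) 0
            then false else true
          else false) true
      if is_lowest then swings ++ [(i, PySem.List.pyGetD lows i 0)] else swings) []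

-- ===== PORT B =====
def find_swing_lows_alt (lows : List Int) (n : Int) : List (Int × Int) :=
  if n = 0 then PySem.List.enumerate lows 0
  else
    let L : Int := (lows.length : Int)
    let pre := (PySem.List.enumerate lows 0).foldl
      (fun pre p =>
        pre ++ [if PySem.Int.mod p.1 n = 0 ∨ pre = [] then p.2
                else min (PySem.List.pyGetD pre (-1) 0) p.2]) []
    let sufR := (PySem.List.pyRange (L - 1) (-1) (-1)).foldl
      (fun suf i =>
        suf ++ [if PySem.Int.mod i n = n - 1 ∨ i = L - 1 then PySem.List.pyGetD lows i 0
                else min (PySem.List.pyGetD suf (-1) 0) (PySem.List.pyGetD lows i 0)]) []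
    let suf := sufR.reverse
    (PySem.List.pyRange n (L - n) 1).foldl
      (fun res i =>
        let x := PySem.List.pyGetD lows i 0
        if x < min (PySem.List.pyGetD suf (i - n) 0) (PySem.List.pyGetD pre (i - 1) 0) ∧
           x < min (PySem.List.pyGetD suf (i + 1) 0) (PySem.List.pyGetD pre (i + n) 0)
        then res ++ [(i, x)] else res) []

-- ===== PRECONDITION & SPEC =====
-- Pre_ excludes n < 0, on which Python A always raises IndexError (the loop
-- index reaches len(lows), and lows[i] is evaluated there).
def Pre_find_swing_lows (lows : List Int) (n : Int) : Prop := 0 ≤ n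
instance (lows : List Int) (n : Int) : Decidable (Pre_find_swing_lows lows n) := by unfold Pre_find_swing_lows; infer_instance
def pvWitness_find_swing_lows : List Int × Int := ([1, 0, 2, 5, 1, 2, 4], 1)
def Spec_find_swing_lows (lows : List Int) (n : Int) (out : List (Int × Int)) : Prop := out = find_swing_lows_alt lows n
instance (lows : List Int) (n : Int) (out : List (Int × Int)) : Decidable (Spec_find_swing_lows lows n out) := by unfold Spec_find_swing_lows; infer_instance

-- ===== CLAIM (what is proved, stated in full; the proofs are below) =====
def Claim_equal_find_swing_lows : Prop := ∀ (lows : List Int) (n : Int), Dom_find_swing_lows lows n → Pre_find_swing_lows lows n → Spec_find_swing_lows lows n (find_swing_lows lows n)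

-- ===== LEMMAS AND PROOFS =====

-- proof-side recursive descriptions of B's block-prefix / block-suffix minima
def pvPre (ls : List Int) (m : Nat) : Nat → Int
  | 0 => ls.getD 0 0
  | i+1 => if (i+1) % m = 0 then ls.getD (i+1) 0 else min (pvPre ls m i) (ls.getD (i+1) 0)

def pvSuf (ls : List Int) (m : Nat) (i : Nat) : Int :=
  if h : i + 1 < ls.length ∧ i % m ≠ m - 1 then min (pvSuf ls m (i+1)) (ls.getD i 0)
  else ls.getD i 0
termination_by ls.length - i
decreasing_by omega

-- mod arithmetic helpers
theorem pv_mod_succ {i m : Nat} (h : i % m ≠ m - 1) : (i+1) % m = i % m + 1 := by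
  by_cases hm : m = 0
  · simp [hm]
  · have hm' : 0 < m := Nat.pos_of_ne_zero hm
    have h1 : i % m < m := Nat.mod_lt _ hm'
    have h2 : i % m + 1 < m := by omega
    have : (i + 1) % m = (i % m + 1 % m) % m := by rw [Nat.add_mod]
    rw [this, Nat.mod_eq_of_lt (by omega : 1 < m), Nat.mod_eq_of_lt h2]

theorem pv_mod_succ_zero {i m : Nat} (hm : 0 < m) (h : i % m = m - 1) : (i+1) % m = 0 := by
  have h1 : m * (i / m) + i % m = i := Nat.div_add_mod i m
  have : i + 1 = m * (i / m + 1) := by rw [Nat.mul_add]; omega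
  rw [this, Nat.mul_mod_right]

-- a window of length m is covered by a block-suffix and a block-prefix interval
theorem pv_cover (m a L : Nat) (hm : 0 < m) (hbL : a + m - 1 < L) (Q : Nat → Prop) :
    ((∀ k, a ≤ k → k < min (a - a % m + m) L → Q k) ∧
     (∀ k, (a+m-1) - (a+m-1) % m ≤ k → k ≤ a+m-1 → Q k))
    ↔ (∀ k, a ≤ k → k ≤ a + m - 1 → Q k) := by
  have hqa : m * (a / m) + a % m = a := Nat.div_add_mod a m
  have hqb : m * ((a+m-1) / m) + (a+m-1) % m = (a+m-1) := Nat.div_add_mod (a+m-1) m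
  have hdl : (a+m-1) / m ≤ (a + m) / m := Nat.div_le_div_right (by omega)
  have had : (a + m) / m = a / m + 1 := Nat.add_div_right a hm
  have hmul : m * ((a+m-1) / m) ≤ m * (a / m + 1) := by
    apply Nat.mul_le_mul_left; omega
  have hma : a % m < m := Nat.mod_lt _ hm
  have hmb : (a+m-1) % m < m := Nat.mod_lt _ hm
  have key : (a+m-1) - (a+m-1) % m ≤ (a - a % m) + m := by
    have := Nat.mul_add m (a / m) 1
    omega
  constructor
  · rintro ⟨h1, h2⟩ k hk1 hk2
    by_cases hc : k < a - a % m + m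
    · exact h1 k hk1 (by omega)
    · exact h2 k (by omega) hk2
  · rintro h
    refine ⟨fun k hk1 hk2 => h k hk1 (by omega), fun k hk1 hk2 => h k (by omega) hk2⟩

theorem pvPre_spec (ls : List Int) (m : Nat) (hm : 0 < m) :
    ∀ i, i < ls.length → ∀ x : Int,
      (x < pvPre ls m i ↔ ∀ k, i - i % m ≤ k → k ≤ i → x < ls.getD k 0) := by
  intro i
  induction i with
  | zero =>
    intro hi x
    simp only [pvPre]
    constructor
    · intro h k h1 h2
      have hk : k = 0 := by omega
      subst hk; exact h
    · intro h; exact h 0 (by omega) le_rfl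
  | succ i ih =>
    intro hi x
    have hml : i % m < m := Nat.mod_lt _ hm
    by_cases h0 : (i+1) % m = 0
    · simp only [pvPre, if_pos h0]
      constructor
      · intro h k h1 h2
        have hk : k = i + 1 := by omega
        subst hk; exact h
      · intro h; exact h (i+1) (by omega) le_rfl
    · have hs : (i+1) % m = i % m + 1 := by
        by_cases hh : i % m = m - 1
        · exact absurd (pv_mod_succ_zero hm hh) h0
        · exact pv_mod_succ hh
      simp only [pvPre, if_neg h0]
      rw [lt_min_iff, ih (by omega) x]
      constructor
      · rintro ⟨h1, h2⟩ k hk1 hk2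
        by_cases hk : k = i + 1
        · subst hk; exact h2
        · exact h1 k (by omega) (by omega)
      · intro h
        exact ⟨fun k hk1 hk2 => h k (by omega) (by omega), h (i+1) (by omega) le_rfl⟩

theorem pvSuf_spec (ls : List Int) (m : Nat) (hm : 0 < m) :
    ∀ i, i < ls.length → ∀ x : Int,
      (x < pvSuf ls m i ↔ ∀ k, i ≤ k → k < min (i - i % m + m) ls.length → x < ls.getD k 0) := by
  suffices H : ∀ t i, i < ls.length → ls.length - i = t → ∀ x : Int,
      (x < pvSuf ls m i ↔ ∀ k, i ≤ k → k < min (i - i % m + m) ls.length → x < ls.getD k 0) by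
    exact fun i hi x => H (ls.length - i) i hi rfl x
  intro t
  induction t with
  | zero => intro i hi ht; omega
  | succ t ih =>
    intro i hi ht x
    have hml : i % m < m := Nat.mod_lt _ hm
    have hmle : i % m ≤ i := Nat.mod_le _ _
    rw [pvSuf]
    by_cases h : i + 1 < ls.length ∧ i % m ≠ m - 1
    · rw [dif_pos h, lt_min_iff, ih (i+1) h.1 (by omega) x]
      have hs : (i+1) % m = i % m + 1 := pv_mod_succ h.2
      constructor
      · rintro ⟨hsu, hse⟩ k hk1 hk2
        by_cases hk : k = i
        · subst hk; exact hse
        · exact hsu k (by omega) (by omega)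
      · intro hq
        exact ⟨fun k hk1 hk2 => hq k (by omega) (by omega), hq i le_rfl (by omega)⟩
    · rw [dif_neg h]
      have hub : min (i - i % m + m) ls.length = i + 1 := by
        push Not at h
        by_cases hl : i + 1 < ls.length
        · have := h hl; omega
        · omega
      constructor
      · intro hx k hk1 hk2
        have hk : k = i := by omega
        subst hk; exact hx
      · intro hq; exact hq i le_rfl (by omega)

-- A's inner loop with break: a fold whose state, once false, stays false
theorem pv_breakfold (C : Int → Prop) [DecidablePred C] (l : List Int) (b : Bool) :
    l.foldl (fun il j => if il then (if C j then false else true) else false) b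
      = (b && l.all fun j => !decide (C j)) := by
  induction l generalizing b with
  | nil => simp
  | cons j l ih =>
    cases b
    · simp only [List.foldl_cons, ih]
      simp
    · simp only [List.foldl_cons, ih, List.all_cons]
      by_cases hC : C j <;> simp [hC]

-- Int index to Nat index
theorem pv_getD_toNat (ls : List Int) (k : Int) (hk : 0 ≤ k) :
    PySem.List.pyGetD ls k 0 = ls.getD k.toNat 0 := by
  conv_lhs => rw [show k = ((k.toNat : Nat) : Int) by omega]
  rw [PySem.List.pyGetD_natCast]

theorem pv_pre_take (lows : List Int) (n : Int) (hn : 1 ≤ n) :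
    ∀ k, k ≤ lows.length →
    ((PySem.List.enumerate lows 0).take k).foldl
      (fun pre p => pre ++ [if PySem.Int.mod p.1 n = 0 ∨ pre = [] then p.2
                    else min (PySem.List.pyGetD pre (-1) 0) p.2]) []
    = (List.range k).map (pvPre lows n.toNat) := by
  intro k
  induction k with
  | zero => intro _; simp
  | succ k ih =>
    intro hk
    have hk' : k < lows.length := by omega
    have hcast : ((n.toNat : Nat) : Int) = n := Int.toNat_of_nonneg (by omega)
    have htake : (PySem.List.enumerate lows 0).take (k+1)
        = (PySem.List.enumerate lows 0).take k ++ [((k : Int), lows[k])] := by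
      rw [List.take_succ]
      congr 1
      rw [PySem.List.getElem?_enumerate, List.getElem?_eq_getElem hk']
      simp
    rw [htake, List.foldl_append, ih (by omega)]
    simp only [List.foldl_cons, List.foldl_nil]
    have hx : lows.getD k 0 = lows[k] := by
      simp [List.getD_eq_getElem?_getD, List.getElem?_eq_getElem hk']
    have hmod : (PySem.Int.mod ((k : Nat) : Int) n = 0) ↔ (k % n.toNat = 0) := by
      rw [← hcast, PySem.Int.mod_natCast]
      exact Int.natCast_eq_zero
    by_cases hk0 : k = 0
    · subst hk0
      rw [if_pos (Or.inr (by simp))]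
      simp [pvPre, hx.symm]
    · obtain ⟨j, rfl⟩ : ∃ j, k = j + 1 := ⟨k - 1, by omega⟩
      have hne : (List.range (j+1)).map (pvPre lows n.toNat) =
          (List.range j).map (pvPre lows n.toNat) ++ [pvPre lows n.toNat j] := by
        rw [List.range_succ, List.map_append]; rfl
      by_cases hc : (j+1) % n.toNat = 0
      · rw [if_pos (Or.inl (hmod.mpr hc))]
        conv_rhs => rw [List.range_succ, List.map_append]
        simp [pvPre, hc, List.getElem?_eq_getElem hk']
      · rw [if_neg (by
          rintro (h | h)
          · exact hc (hmod.mp h)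
          · rw [hne] at h; simp at h)]
        rw [hne, PySem.List.pyGetD_neg_one_append_singleton]
        conv_rhs => rw [List.range_succ, List.map_append, hne]
        have hp : pvPre lows n.toNat (j+1) = min (pvPre lows n.toNat j) (lows.getD (j+1) 0) := by
          simp [pvPre, hc]
        simp [hp, List.append_assoc, List.getElem?_eq_getElem hk']

-- B's prefix-minima list is (range L).map (pvPre ls m)
theorem pv_pre_eq (lows : List Int) (n : Int) (hn : 1 ≤ n) :
    (PySem.List.enumerate lows 0).foldl
      (fun pre p => pre ++ [if PySem.Int.mod p.1 n = 0 ∨ pre = [] then p.2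
                    else min (PySem.List.pyGetD pre (-1) 0) p.2]) []
    = (List.range lows.length).map (pvPre lows n.toNat) := by
  have h1 : (PySem.List.enumerate lows 0).take lows.length = PySem.List.enumerate lows 0 := by
    apply List.take_of_length_le
    rw [PySem.List.length_enumerate]
  rw [← h1]
  exact pv_pre_take lows n hn lows.length le_rfl

theorem pv_suf_step (lows : List Int) (n : Int) (hn : 1 ≤ n) (a : Nat)
    (ha : a < lows.length) (acc : List Int)
    (hacc : a + 1 < lows.length → acc.getLast? = some (pvSuf lows n.toNat (a+1))) :
    acc ++ [if PySem.Int.mod ((a : Nat) : Int) n = n - 1 ∨ ((a : Nat) : Int) = (lows.length : Int) - 1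
            then PySem.List.pyGetD lows ((a : Nat) : Int) 0
            else min (PySem.List.pyGetD acc (-1) 0) (PySem.List.pyGetD lows ((a : Nat) : Int) 0)]
    = acc ++ [pvSuf lows n.toNat a] := by
  have hcast : ((n.toNat : Nat) : Int) = n := Int.toNat_of_nonneg (by omega)
  have hm1 : 1 ≤ n.toNat := by omega
  have hg : PySem.List.pyGetD lows ((a : Nat) : Int) 0 = lows.getD a 0 := by
    rw [PySem.List.pyGetD_natCast]
  have hmod : (PySem.Int.mod ((a : Nat) : Int) n = n - 1) ↔ (a % n.toNat = n.toNat - 1) := by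
    rw [← hcast, PySem.Int.mod_natCast]
    simp only [Int.toNat_natCast]
    have h1 : a % n.toNat < n.toNat := Nat.mod_lt _ (by omega)
    omega
  have hlast : (((a : Nat) : Int) = (lows.length : Int) - 1) ↔ (a + 1 = lows.length) := by omega
  by_cases hcond : a % n.toNat = n.toNat - 1 ∨ a + 1 = lows.length
  · rw [if_pos (by rcases hcond with h | h; exact Or.inl (hmod.mpr h); exact Or.inr (hlast.mpr h))]
    rw [pvSuf, dif_neg (by rintro ⟨h1, h2⟩; rcases hcond with h | h; exact h2 h; omega), hg]
  · push Not at hcond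
    rw [if_neg (by rintro (h | h); exact hcond.1 (hmod.mp h); exact hcond.2 (hlast.mp h))]
    have hlt : a + 1 < lows.length := by omega
    have hl? : acc.getLast? = some (pvSuf lows n.toNat (a+1)) := hacc hlt
    have hne : acc ≠ [] := by intro h; rw [h] at hl?; simp at hl?
    have hgl : PySem.List.pyGetD acc (-1) 0 = pvSuf lows n.toNat (a+1) := by
      rw [PySem.List.pyGetD_neg_one acc 0 hne]
      have := List.getLast?_eq_getLast (l := acc) hne
      rw [this] at hl?
      exact Option.some.inj hl?
    rw [pvSuf, dif_pos ⟨hlt, hcond.1⟩, hg, hgl]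

theorem pv_suf_aux (lows : List Int) (n : Int) (hn : 1 ≤ n) :
    ∀ (a : Nat), a < lows.length → ∀ acc : List Int,
    (a + 1 < lows.length → acc.getLast? = some (pvSuf lows n.toNat (a+1))) →
    (PySem.List.pyRange ((a : Nat) : Int) (-1) (-1)).foldl
      (fun suf i => suf ++ [if PySem.Int.mod i n = n - 1 ∨ i = (lows.length : Int) - 1
                    then PySem.List.pyGetD lows i 0
                    else min (PySem.List.pyGetD suf (-1) 0) (PySem.List.pyGetD lows i 0)]) acc
    = acc ++ (PySem.List.pyRange ((a : Nat) : Int) (-1) (-1)).map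
        (fun i => pvSuf lows n.toNat i.toNat) := by
  intro a
  induction a with
  | zero =>
    intro ha acc hacc
    rw [PySem.List.pyRange_neg_one_cons (by norm_num : (-1 : Int) < ((0 : Nat) : Int)),
        show ((0 : Nat) : Int) - 1 = -1 by norm_num,
        PySem.List.pyRange_neg_one_eq_nil le_rfl]
    simpa using pv_suf_step lows n hn 0 ha acc hacc
  | succ a ih =>
    intro ha acc hacc
    rw [PySem.List.pyRange_neg_one_cons (by push_cast; omega : (-1 : Int) < ((a + 1 : Nat) : Int)),
        show ((a + 1 : Nat) : Int) - 1 = ((a : Nat) : Int) by push_cast; ring]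
    simp only [List.foldl_cons, List.map_cons]
    rw [pv_suf_step lows n hn (a+1) ha acc hacc]
    rw [ih (by omega) (acc ++ [pvSuf lows n.toNat (a+1)])
        (fun _ => by rw [List.getLast?_concat])]
    simp [List.append_assoc]

-- B's backward pass, reversed, is (pyRange 0 L 1).map (pvSuf ls m ·.toNat)
theorem pv_suf_eq (lows : List Int) (n : Int) (hn : 1 ≤ n) :
    ((PySem.List.pyRange ((lows.length : Int) - 1) (-1) (-1)).foldl
      (fun suf i => suf ++ [if PySem.Int.mod i n = n - 1 ∨ i = (lows.length : Int) - 1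
                    then PySem.List.pyGetD lows i 0
                    else min (PySem.List.pyGetD suf (-1) 0) (PySem.List.pyGetD lows i 0)]) []).reverse
    = (PySem.List.pyRange 0 (lows.length : Int) 1).map (fun i => pvSuf lows n.toNat i.toNat) := by
  by_cases hL : lows.length = 0
  · have h0 : lows = [] := List.length_eq_zero_iff.mp hL
    subst h0
    norm_num [PySem.List.pyRange_neg_one_eq_nil, PySem.List.pyRange_one_eq_nil]
  · have h1 : ((lows.length : Int) - 1) = ((lows.length - 1 : Nat) : Int) := by omega
    conv_lhs => rw [show (PySem.List.pyRange ((lows.length : Int) - 1) (-1) (-1))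
        = (PySem.List.pyRange ((lows.length - 1 : Nat) : Int) (-1) (-1)) by rw [h1]]
    rw [pv_suf_aux lows n hn (lows.length - 1) (by omega) []
        (fun h => absurd h (by omega))]
    rw [PySem.List.pyRange_neg_one_eq_reverse,
        show ((lows.length - 1 : Nat) : Int) + 1 = (lows.length : Int) by omega]
    simp [List.map_reverse]

-- pointwise: A's neighbour test equals B's two-window-minimum test
theorem pv_pointwise (lows : List Int) (n : Int) (hn : 1 ≤ n) (i : Int)
    (hi1 : n ≤ i) (hi2 : i < (lows.length : Int) - n) :
    ((∀ j : Int, 1 ≤ j → j < n + 1 →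
        ¬(PySem.List.pyGetD lows i 0 ≥ PySem.List.pyGetD lows (i - j) 0 ∨
          PySem.List.pyGetD lows i 0 ≥ PySem.List.pyGetD lows (i + j) 0))
     ↔ (PySem.List.pyGetD lows i 0 <
          min (pvSuf lows n.toNat (i - n).toNat) (pvPre lows n.toNat (i - 1).toNat) ∧
        PySem.List.pyGetD lows i 0 <
          min (pvSuf lows n.toNat (i + 1).toNat) (pvPre lows n.toNat (i + n).toNat))) := by
  have hm : 1 ≤ n.toNat := by omega
  have hx : PySem.List.pyGetD lows i 0 = lows.getD i.toNat 0 := pv_getD_toNat lows i (by omega)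
  have hb1 : (i - 1).toNat = (i - n).toNat + n.toNat - 1 := by omega
  have hb2 : (i + n).toNat = (i + 1).toNat + n.toNat - 1 := by omega
  simp only [hx]
  rw [lt_min_iff, lt_min_iff, hb1, hb2,
      pvSuf_spec lows n.toNat hm (i - n).toNat (by omega) (lows.getD i.toNat 0),
      pvPre_spec lows n.toNat hm ((i - n).toNat + n.toNat - 1) (by omega) (lows.getD i.toNat 0),
      pvSuf_spec lows n.toNat hm (i + 1).toNat (by omega) (lows.getD i.toNat 0),
      pvPre_spec lows n.toNat hm ((i + 1).toNat + n.toNat - 1) (by omega) (lows.getD i.toNat 0),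
      pv_cover n.toNat (i - n).toNat lows.length hm (by omega) _,
      pv_cover n.toNat (i + 1).toNat lows.length hm (by omega) _]
  constructor
  · intro h
    constructor
    · intro k hk1 hk2
      have h' := h (i - (k : Int)) (by omega) (by omega)
      push Not at h'
      have he : i - (i - (k : Int)) = ((k : Nat) : Int) := by ring
      rw [he, PySem.List.pyGetD_natCast] at h'
      exact h'.1
    · intro k hk1 hk2
      have h' := h ((k : Int) - i) (by omega) (by omega)
      push Not at h'
      have he : i + ((k : Int) - i) = ((k : Nat) : Int) := by ring
      rw [he, PySem.List.pyGetD_natCast] at h'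
      exact h'.2
  · rintro ⟨h1, h2⟩ j hj1 hj2
    push Not
    constructor
    · rw [pv_getD_toNat lows (i - j) (by omega)]
      exact h1 (i - j).toNat (by omega) (by omega)
    · rw [pv_getD_toNat lows (i + j) (by omega)]
      exact h2 (i + j).toNat (by omega) (by omega)

theorem pv_getD_map_range (f : Nat → Int) (L k : Nat) (h : k < L) :
    ((List.range L).map f).getD k 0 = f k := by
  simp [List.getD_eq_getElem?_getD, List.getElem?_map, List.getElem?_range h]

theorem pv_A_eq (lows : List Int) (n : Int) :
    find_swing_lows lows n
    = ((PySem.List.pyRange n ((lows.length : Int) - n) 1).filter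
        (fun i => (PySem.List.pyRange 1 (n + 1) 1).all
          (fun j => !decide (PySem.List.pyGetD lows i 0 ≥ PySem.List.pyGetD lows (i - j) 0 ∨
                             PySem.List.pyGetD lows i 0 ≥ PySem.List.pyGetD lows (i + j) 0)))).map
        (fun i => (i, PySem.List.pyGetD lows i 0)) := by
  unfold find_swing_lows
  dsimp only
  simp only [pv_breakfold, Bool.true_and]
  rw [PySem.List.foldl_append_if]
  simp

-- ===== VERDICT (by name: the statement is the Claim_ definition above) =====
theorem find_swing_lows_spec : Claim_equal_find_swing_lows := by
  unfold Claim_equal_find_swing_lows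
  intro lows n _ hpre
  unfold Spec_find_swing_lows
  unfold Pre_find_swing_lows at hpre
  by_cases hn0 : n = 0
  · subst hn0
    unfold find_swing_lows find_swing_lows_alt
    rw [if_pos rfl]
    have hinner : PySem.List.pyRange 1 ((0 : Int) + 1) 1 = [] :=
      PySem.List.pyRange_one_eq_nil (by norm_num)
    simp only [hinner, List.foldl_nil, if_true]
    rw [PySem.List.foldl_append_singleton_eq_map, PySem.List.enumerate_eq_map_pyRange (d := 0)]
    simp
  · have hn1 : 1 ≤ n := by omega
    rw [pv_A_eq lows n]
    unfold find_swing_lows_alt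
    rw [if_neg hn0]
    dsimp only
    simp only [pv_pre_eq lows n hn1, pv_suf_eq lows n hn1]
    rw [PySem.List.foldl_append_ite]
    simp only [List.nil_append]
    apply congrArg
    apply List.filter_congr
    intro i hi
    rw [PySem.List.mem_pyRange_one] at hi
    have hiff := pv_pointwise lows n hn1 i hi.1 hi.2
    rw [PySem.List.pyGetD_map_pyRange_of_nonneg (fun i => pvSuf lows n.toNat i.toNat)
          (lows.length : Int) (i - n) 0 (by omega) (by omega),
        PySem.List.pyGetD_map_pyRange_of_nonneg (fun i => pvSuf lows n.toNat i.toNat)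
          (lows.length : Int) (i + 1) 0 (by omega) (by omega),
        pv_getD_toNat _ (i - 1) (by omega), pv_getD_toNat _ (i + n) (by omega),
        pv_getD_map_range (pvPre lows n.toNat) lows.length (i - 1).toNat (by omega),
        pv_getD_map_range (pvPre lows n.toNat) lows.length (i + n).toNat (by omega)]
    rw [Bool.eq_iff_iff, List.all_eq_true, decide_eq_true_iff]
    constructor
    · intro h
      exact hiff.mp (fun j h1 h2 => by
        have hh := h j (PySem.List.mem_pyRange_one.mpr ⟨h1, h2⟩)
        simpa using hh)
    · intro h j hj
      rw [PySem.List.mem_pyRange_one] at hj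
      simpa using hiff.mpr h j hj.1 hj.2
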